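-- pv_equiv track=rewrite | github.com/harrietobrien/coderbyte | solutions/alphabet_soup.py | AlphabetSoupNaive
-- ===== SOURCE A (Python) =====
-- import string
--
-- def AlphabetSoupNaive(s: str):
--     rm_punc = s.translate(s.maketrans('', '', string.punctuation))
--     res = list()
--     n = len(rm_punc)
--     for i in range(n):
--         res.append(rm_punc[i])
--     for i in range(n):
--         for j in range(n):
--             if res[i] < res[j]:
--                 res[i], res[j] = res[j], res[i]
--     j = ""
--     for i in range(len(rm_punc)):
--         j = j + res[i]
--     return j
-- ===== SOURCE B (Python) =====
-- import string
--
-- def AlphabetSoupNaive(s: str):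
--     stripped = s.translate(s.maketrans('', '', string.punctuation))
--     counts = [0] * 128
--     for ch in stripped:
--         counts[ord(ch)] += 1
--     return ''.join(chr(c) * counts[c] for c in range(128))
-- ===== Notes on version B (the rewrite author's own statement) =====
-- stated objective: faster
-- what changed: Replaces the quadratic index-pair compare-and-swap sort with a counting sort: one pass fills a 128-slot ASCII frequency array, then the result is emitted by scanning the code points in order.
import Mathlib
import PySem

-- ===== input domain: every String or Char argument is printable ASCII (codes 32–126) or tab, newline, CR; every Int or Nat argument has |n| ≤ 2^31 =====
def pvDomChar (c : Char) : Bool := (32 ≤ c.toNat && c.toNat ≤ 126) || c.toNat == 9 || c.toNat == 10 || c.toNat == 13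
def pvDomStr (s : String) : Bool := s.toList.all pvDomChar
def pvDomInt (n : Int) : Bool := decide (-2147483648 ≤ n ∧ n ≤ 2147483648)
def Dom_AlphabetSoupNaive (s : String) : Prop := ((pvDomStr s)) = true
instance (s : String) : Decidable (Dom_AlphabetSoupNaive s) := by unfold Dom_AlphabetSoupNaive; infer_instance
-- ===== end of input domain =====

-- B replaces A's quadratic compare-and-swap sort by a counting sort over the 128 ASCII slots (measurably faster).


-- ===== PORT A =====
-- string.punctuation
def pvPunct : List Char := "!\"#$%&'()*+,-./:;<=>?@[\\]^_`{|}~".toList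

def AlphabetSoupNaive (s : String) : String :=
  -- s.translate(s.maketrans('', '', string.punctuation)) deletes exactly the punctuation
  -- characters and keeps every other character (hand port, exact: the table only deletes).
  let rmPunc : List Char := s.toList.filter (fun c => !pvPunct.contains c)
  let n : Int := (rmPunc.length : Int)
  let res : List Char :=
    (PySem.List.pyRange 0 n 1).foldl (fun acc i => acc ++ [PySem.List.pyGetD rmPunc i ' ']) []
  let res2 : List Char :=
    (PySem.List.pyRange 0 n 1).foldl (fun r i =>
      (PySem.List.pyRange 0 n 1).foldl (fun r j =>
        if PySem.List.pyGetD r i ' ' < PySem.List.pyGetD r j ' ' then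
          PySem.List.pySetD (PySem.List.pySetD r i (PySem.List.pyGetD r j ' ')) j
            (PySem.List.pyGetD r i ' ')
        else r) r) res
  let out : List Char :=
    (PySem.List.pyRange 0 n 1).foldl (fun acc i => acc ++ [PySem.List.pyGetD res2 i ' ']) []
  String.ofList out

-- ===== PORT B =====
def AlphabetSoupNaive_alt (s : String) : String :=
  let stripped : List Char := s.toList.filter (fun c => !pvPunct.contains c)
  let counts : List Int :=
    stripped.foldl (fun cs ch => cs.set ch.toNat (cs.getD ch.toNat 0 + 1))
      (List.replicate 128 (0 : Int))
  String.ofList ((List.range 128).flatMap (fun c => List.replicate (counts.getD c 0).toNat (Char.ofNat c)))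

-- ===== PRECONDITION & SPEC =====
def Spec_AlphabetSoupNaive (s : String) (out : String) : Prop := out = AlphabetSoupNaive_alt s
instance (s : String) (out : String) : Decidable (Spec_AlphabetSoupNaive s out) := by unfold Spec_AlphabetSoupNaive; infer_instance

-- ===== CLAIM (what is proved, stated in full; the proofs are below) =====
def Claim_equal_AlphabetSoupNaive : Prop := ∀ (s : String), Dom_AlphabetSoupNaive s → Spec_AlphabetSoupNaive s (AlphabetSoupNaive s)

-- ===== LEMMAS AND PROOFS =====

lemma getD_set_lt {α : Type} (l : List α) (k : Nat) (c d : α) (i : Nat) (hk : k < l.length) :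
    (l.set k c).getD i d = if i = k then c else l.getD i d := by
  simp only [List.getD, List.getElem?_set]
  by_cases h1 : k = i
  · subst h1; simp [hk]
  · rw [if_neg h1, if_neg (fun hh => h1 hh.symm)]

lemma charOfNat_toNat (n : Nat) (h : n < 128) : (Char.ofNat n).toNat = n := by
  rw [Char.toNat_ofNat, if_pos]; exact Or.inl (by omega)

lemma char_le_iff (a b : Char) : a ≤ b ↔ a.toNat ≤ b.toNat := by
  rw [Char.le_def]; exact UInt32.le_iff_toNat_le

lemma char_toNat_inj (a b : Char) (h : a.toNat = b.toNat) : a = b := by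
  apply Char.ext; exact UInt32.toNat_inj.mp h

lemma getD_concat (u v : List Char) (b d : Char) : (u ++ b :: v).getD u.length d = b := by
  simp [List.getD]

lemma set_concat (u v : List Char) (b c : Char) : (u ++ b :: v).set u.length c = u ++ c :: v := by
  simp

lemma getD_concat' (u v w : List Char) (b c d : Char) :
    (u ++ b :: (v ++ c :: w)).getD (u.length + 1 + v.length) d = c := by
  have h1 : u ++ b :: (v ++ c :: w) = (u ++ b :: v) ++ c :: w := by simp
  have h2 : u.length + 1 + v.length = (u ++ b :: v).length := by simp; omega
  rw [h1, h2, getD_concat]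

lemma set_concat' (u v w : List Char) (b c c' : Char) :
    (u ++ b :: (v ++ c :: w)).set (u.length + 1 + v.length) c' = u ++ b :: (v ++ c' :: w) := by
  have h1 : u ++ b :: (v ++ c :: w) = (u ++ b :: v) ++ c :: w := by simp
  have h2 : u.length + 1 + v.length = (u ++ b :: v).length := by simp; omega
  rw [h1, h2, set_concat]; simp

def csPass : List Char → Char → List Char × Char
  | [], x => ([], x)
  | b :: bs, x =>
    if x < b then ((x :: (csPass bs b).1), (csPass bs b).2)
    else ((b :: (csPass bs x).1), (csPass bs x).2)

def swapStep (i : Nat) (r : List Char) (j : Nat) : List Char :=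
  if r.getD i ' ' < r.getD j ' ' then (r.set i (r.getD j ' ')).set j (r.getD i ' ') else r

def innerLoop (n i : Nat) (r : List Char) : List Char :=
  (List.range n).foldl (fun r j => swapStep i r j) r

def outerLoop (n : Nat) (r : List Char) : List Char :=
  (List.range n).foldl (fun r i => innerLoop n i r) r

def SortInv (l : List Char) (k : Nat) (r : List Char) : Prop :=
  r.Perm l ∧ (r.take (k + 1)).Pairwise (· ≤ ·) ∧ (∀ e ∈ r, e ≤ r.getD k ' ')

lemma cs_length (p : List Char) : ∀ x, (csPass p x).1.length = p.length := by
  induction p with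
  | nil => intro x; rfl
  | cons b bs ih => intro x; simp only [csPass]; split_ifs <;> simp [ih]

lemma cs_perm (p : List Char) : ∀ x, ((csPass p x).1 ++ [(csPass p x).2]).Perm (p ++ [x]) := by
  induction p with
  | nil => intro x; simp [csPass]
  | cons b bs ih =>
    intro x; simp only [csPass]; split_ifs with h
    · refine List.Perm.trans (by simp) (List.Perm.trans ((ih b).cons x) ?_)
      refine List.Perm.trans ((List.perm_append_singleton b bs).cons x) ?_
      refine List.Perm.trans (List.Perm.swap b x bs) ?_
      exact ((List.perm_append_singleton x bs).symm).cons b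
    · exact List.Perm.trans (by simp) ((ih x).cons b)

lemma cs_carry_max (p : List Char) : ∀ x, (∀ e ∈ p, e ≤ (csPass p x).2) ∧ x ≤ (csPass p x).2 := by
  induction p with
  | nil => intro x; simp [csPass]
  | cons b bs ih =>
    intro x; simp only [csPass]; split_ifs with h
    · refine ⟨?_, le_of_lt (lt_of_lt_of_le h (ih b).2)⟩
      intro e he; rcases List.mem_cons.mp he with rfl | he
      · exact (ih e).2
      · exact (ih b).1 e he
    · refine ⟨?_, (ih x).2⟩
      intro e he; rcases List.mem_cons.mp he with rfl | he
      · exact le_trans (not_lt.mp h) (ih x).2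
      · exact (ih x).1 e he

lemma cs_out_le_carry (p : List Char) : ∀ x, ∀ e ∈ (csPass p x).1, e ≤ (csPass p x).2 := by
  induction p with
  | nil => intro x e he; simp [csPass] at he
  | cons b bs ih =>
    intro x e he; simp only [csPass] at he ⊢; split_ifs with h
    · rw [if_pos h] at he
      rcases List.mem_cons.mp he with rfl | he
      · exact le_of_lt (lt_of_lt_of_le h (cs_carry_max bs b).2)
      · exact ih b e he
    · rw [if_neg h] at he
      rcases List.mem_cons.mp he with rfl | he
      · exact le_trans (not_lt.mp h) (cs_carry_max bs x).2
      · exact ih x e he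

lemma cs_mem (p : List Char) (x e : Char) (h : e ∈ (csPass p x).1) : e ∈ p ∨ e = x := by
  have h2 : e ∈ (csPass p x).1 ++ [(csPass p x).2] := List.mem_append_left _ h
  have := (cs_perm p x).mem_iff.mp h2
  simpa using this

lemma cs_sorted (p : List Char) : ∀ x, p.Pairwise (· ≤ ·) → (csPass p x).1.Pairwise (· ≤ ·) := by
  induction p with
  | nil => intro x _; simp [csPass]
  | cons b bs ih =>
    intro x hs; simp only [csPass]
    have hs' := (List.pairwise_cons.mp hs)
    split_ifs with h
    · refine List.pairwise_cons.mpr ⟨?_, ih b hs'.2⟩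
      intro e he
      rcases cs_mem bs b e he with he' | rfl
      · exact le_of_lt (lt_of_lt_of_le h (hs'.1 e he'))
      · exact le_of_lt h
    · refine List.pairwise_cons.mpr ⟨?_, ih x hs'.2⟩
      intro e he
      rcases cs_mem bs x e he with he' | rfl
      · exact hs'.1 e he'
      · exact not_lt.mp h

lemma phase1 (p : List Char) : ∀ (pre : List Char) (x : Char) (t : List Char) (i : Nat),
    i = pre.length + p.length →
    (List.range' pre.length p.length).foldl (fun r j => swapStep i r j) (pre ++ p ++ x :: t)
      = pre ++ (csPass p x).1 ++ (csPass p x).2 :: t := by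
  induction p with
  | nil => intro pre x t i hi; simp [csPass]
  | cons b bs ih =>
    intro pre x t i hi
    rw [List.length_cons, List.range'_succ, List.foldl_cons]
    have hi' : i = pre.length + 1 + bs.length := by simp at hi; omega
    have hstep : swapStep i (pre ++ (b :: bs) ++ x :: t) pre.length
        = if x < b then pre ++ x :: (bs ++ b :: t) else pre ++ (b :: bs) ++ x :: t := by
      have hget_j : (pre ++ (b :: bs) ++ x :: t).getD pre.length ' ' = b := by
        rw [List.append_assoc, List.cons_append, getD_concat]
      have hget_i : (pre ++ (b :: bs) ++ x :: t).getD i ' ' = x := by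
        rw [List.append_assoc, List.cons_append, hi', getD_concat']
      simp only [swapStep, hget_j, hget_i]
      split_ifs with h
      · rw [List.append_assoc, List.cons_append, hi', set_concat', set_concat]
      · rfl
    rw [hstep]
    split_ifs with h
    · have H := ih (pre ++ [x]) b t i (by simp at hi ⊢; omega)
      simp only [List.append_assoc, List.cons_append, List.nil_append, Nat.zero_add,
        List.length_append, List.length_cons, List.length_nil] at H ⊢
      rw [H]; simp only [csPass, if_pos h]; simp
    · have H := ih (pre ++ [b]) x t i (by simp at hi ⊢; omega)
      simp only [List.append_assoc, List.cons_append, List.nil_append, Nat.zero_add,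
        List.length_append, List.length_cons, List.length_nil] at H ⊢
      rw [H]; simp only [csPass, if_neg h]; simp

lemma swapStep_self (i : Nat) (r : List Char) : swapStep i r i = r := by
  simp [swapStep]

lemma phase3 (t : List Char) : ∀ (q pre : List Char) (x : Char), (∀ e ∈ t, e ≤ x) →
    (List.range' (q.length + 1 + pre.length) t.length).foldl (fun r j => swapStep q.length r j)
      (q ++ x :: (pre ++ t)) = q ++ x :: (pre ++ t) := by
  induction t with
  | nil => intro q pre x _; simp
  | cons b bs ih =>
    intro q pre x hle
    rw [List.length_cons, List.range'_succ, List.foldl_cons]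
    have hget_i : (q ++ x :: (pre ++ b :: bs)).getD q.length ' ' = x := getD_concat _ _ _ _
    have hget_j : (q ++ x :: (pre ++ b :: bs)).getD (q.length + 1 + pre.length) ' ' = b :=
      getD_concat' _ _ _ _ _ _
    have hstep : swapStep q.length (q ++ x :: (pre ++ b :: bs)) (q.length + 1 + pre.length)
        = q ++ x :: (pre ++ b :: bs) := by
      simp only [swapStep, hget_i, hget_j]
      rw [if_neg (not_lt.mpr (hle b (by simp)))]
    rw [hstep]
    have H := ih q (pre ++ [b]) x (fun e he => hle e (by simp [he]))
    simp only [List.append_assoc, List.cons_append, List.nil_append, Nat.zero_add,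
      List.length_append, List.length_cons, List.length_nil] at H ⊢
    have harith : q.length + 1 + pre.length + 1 = q.length + 1 + (pre.length + 1) := by omega
    rw [harith]
    exact H

lemma phase0 (t : List Char) : ∀ (cur : Char) (pre : List Char),
    (List.range' (1 + pre.length) t.length).foldl (fun r j => swapStep 0 r j) (cur :: (pre ++ t))
      = (csPass t cur).2 :: (pre ++ (csPass t cur).1) := by
  induction t with
  | nil => intro cur pre; simp [csPass]
  | cons b bs ih =>
    intro cur pre
    rw [List.length_cons, List.range'_succ, List.foldl_cons]
    have hget0 : (cur :: (pre ++ b :: bs)).getD 0 ' ' = cur := rfl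
    have hgetj : (cur :: (pre ++ b :: bs)).getD (1 + pre.length) ' ' = b := by
      have := getD_concat' ([] : List Char) pre bs cur b ' '
      simpa using this
    have hstep : swapStep 0 (cur :: (pre ++ b :: bs)) (1 + pre.length)
        = if cur < b then b :: (pre ++ cur :: bs) else cur :: (pre ++ b :: bs) := by
      simp only [swapStep, hget0, hgetj]
      split_ifs with h
      · have h1 : (cur :: (pre ++ b :: bs)).set 0 b = b :: (pre ++ b :: bs) := rfl
        rw [h1]
        have h2 := set_concat' ([] : List Char) pre bs b b cur
        simpa using h2
      · rfl
    rw [hstep]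
    split_ifs with h
    · have H := ih b (pre ++ [cur])
      simp only [List.append_assoc, List.cons_append, List.nil_append, Nat.zero_add,
        List.length_append, List.length_cons, List.length_nil] at H ⊢
      have harith : 1 + pre.length + 1 = 1 + (pre.length + 1) := by omega
      rw [harith, H]; simp only [csPass, if_pos h]
    · have H := ih cur (pre ++ [b])
      simp only [List.append_assoc, List.cons_append, List.nil_append, Nat.zero_add,
        List.length_append, List.length_cons, List.length_nil] at H ⊢
      have harith : 1 + pre.length + 1 = 1 + (pre.length + 1) := by omega
      rw [harith, H]; simp only [csPass, if_neg h]

lemma inner_char (p : List Char) (x : Char) (t : List Char) (i : Nat)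
    (hlen : p.length = i) (ht : ∀ e ∈ t, e ≤ (csPass p x).2) :
    innerLoop (i + 1 + t.length) i (p ++ x :: t) = (csPass p x).1 ++ (csPass p x).2 :: t := by
  unfold innerLoop
  have hsplit : List.range (i + 1 + t.length) = List.range' 0 i ++ List.range' i (1 + t.length) := by
    have := @List.range'_append 0 i (1 + t.length) 1
    simp at this
    rw [List.range_eq_range', show i + 1 + t.length = i + (1 + t.length) from by omega, ← this]
  rw [hsplit, List.foldl_append]
  have h1 : (List.range' 0 i).foldl (fun r j => swapStep i r j) (p ++ x :: t)
      = (csPass p x).1 ++ (csPass p x).2 :: t := by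
    have := phase1 p [] x t i (by simpa using hlen.symm)
    simpa [hlen] using this
  rw [h1]
  have hone : (1 : Nat) + t.length = t.length + 1 := by omega
  rw [hone, List.range'_succ, List.foldl_cons, swapStep_self]
  have hq : i = (csPass p x).1.length := by rw [cs_length]; omega
  have H := phase3 t ((csPass p x).1) [] ((csPass p x).2) ht
  simp only [List.nil_append, List.length_nil, Nat.add_zero] at H
  rw [hq]
  exact H

lemma inner_zero (t : List Char) (cur : Char) :
    innerLoop (1 + t.length) 0 (cur :: t) = (csPass t cur).2 :: (csPass t cur).1 := by
  unfold innerLoop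
  have hone : (1 : Nat) + t.length = t.length + 1 := by omega
  rw [List.range_eq_range', hone, List.range'_succ, List.foldl_cons, swapStep_self]
  have H := phase0 t cur []
  simpa using H

lemma outer_inv (l : List Char) : ∀ (k : Nat), k < l.length →
    SortInv l k ((List.range' 0 (k + 1)).foldl (fun r i => innerLoop l.length i r) l) := by
  intro k
  induction k with
  | zero =>
    intro hk
    obtain ⟨cur, t, rfl⟩ : ∃ cur t, l = cur :: t := by
      cases l with
      | nil => simp at hk
      | cons a b => exact ⟨a, b, rfl⟩
    have hlen : (cur :: t).length = 1 + t.length := by rw [List.length_cons]; omega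
    have h01 : List.range' 0 (0 + 1) = [0] := rfl
    simp only [hlen, h01, List.foldl_cons, List.foldl_nil]
    rw [inner_zero]
    refine ⟨?_, by simp, ?_⟩
    · refine List.Perm.trans ((List.perm_append_singleton _ _).symm) ?_
      exact (cs_perm t cur).trans (List.perm_append_singleton _ _)
    · intro e he
      rcases List.mem_cons.mp he with rfl | he
      · simp [List.getD]
      · simpa [List.getD] using cs_out_le_carry t cur e he
  | succ k ihk =>
    intro hk
    have H := ihk (by omega)
    set r := (List.range' 0 (k + 1)).foldl (fun r i => innerLoop l.length i r) l with hr
    obtain ⟨hperm, hsorted, hmax⟩ := H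
    have hrl : r.length = l.length := hperm.length_eq
    have hklt : k + 1 < r.length := by omega
    set p := r.take (k + 1) with hp
    set x := r.getD (k + 1) ' ' with hx
    set t := r.drop (k + 2) with ht
    have hxel : x = r[k + 1]'hklt := by
      rw [hx, List.getD, List.getElem?_eq_getElem hklt]; rfl
    have hdecomp : r = p ++ x :: t := by
      rw [hp, hxel, ht]
      conv_lhs => rw [← List.take_append_drop (k + 1) r]
      congr 1
      rw [List.drop_eq_getElem_cons hklt]
    have hplen : p.length = k + 1 := by rw [hp, List.length_take]; omega
    have hfold : (List.range' 0 (k + 1 + 1)).foldl (fun r i => innerLoop l.length i r) l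
        = innerLoop l.length (k + 1) r := by
      have hsp : List.range' 0 (k + 1 + 1) = List.range' 0 (k + 1) ++ [k + 1] := by
        have := @List.range'_append 0 (k + 1) 1 1
        simp at this
        rw [← this]
      rw [hsp, List.foldl_append, ← hr]; simp
    have hnl : l.length = (k + 1) + 1 + t.length := by
      rw [ht, List.length_drop]; omega
    -- the max of r sits inside p
    have hmaxp : r.getD k ' ' ∈ p := by
      have hkp : k < p.length := by omega
      have : p.getD k ' ' = r.getD k ' ' := by
        rw [hp, List.getD, List.getD, List.getElem?_take_of_lt (by omega)]
      rw [← this]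
      rw [List.getD, List.getElem?_eq_getElem (by omega)]
      exact List.getElem_mem _
    have htle : ∀ e ∈ t, e ≤ (csPass p x).2 := by
      intro e he
      have her : e ∈ r := by rw [ht] at he; exact List.mem_of_mem_drop he
      exact le_trans (hmax e her) ((cs_carry_max p x).1 _ hmaxp)
    rw [hfold, hnl, hdecomp, inner_char p x t (k + 1) hplen htle]
    have hcl : (csPass p x).1.length = k + 1 := by rw [cs_length, hplen]
    refine ⟨?_, ?_, ?_⟩
    · refine List.Perm.trans ?_ (hdecomp ▸ hperm)
      have h1 : (csPass p x).1 ++ (csPass p x).2 :: t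
          = ((csPass p x).1 ++ [(csPass p x).2]) ++ t := by simp
      rw [h1]
      have h2 := (cs_perm p x).append_right t
      simpa using h2
    · have htake : ((csPass p x).1 ++ (csPass p x).2 :: t).take (k + 1 + 1)
          = (csPass p x).1 ++ [(csPass p x).2] := by
        rw [List.take_append, List.take_of_length_le (by rw [hcl]; omega), hcl]
        simp
      rw [htake]
      rw [List.pairwise_append]
      refine ⟨cs_sorted p x (by rwa [hp] at hsorted ⊢), by simp, ?_⟩
      intro a ha b hb
      simp at hb; subst hb
      exact cs_out_le_carry p x a ha
    · have hget : ((csPass p x).1 ++ (csPass p x).2 :: t).getD (k + 1) ' ' = (csPass p x).2 := by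
        rw [← hcl, getD_concat]
      rw [hget]
      intro e he
      rcases List.mem_append.mp he with he | he
      · exact cs_out_le_carry p x e he
      · rcases List.mem_cons.mp he with rfl | he
        · exact le_refl _
        · exact htle e he

lemma outer_sorts (l : List Char) :
    (outerLoop l.length l).Perm l ∧ (outerLoop l.length l).Pairwise (· ≤ ·) := by
  unfold outerLoop
  cases hl : l.length with
  | zero =>
    rw [List.length_eq_zero_iff.mp hl]
    simp
  | succ m =>
    have H := outer_inv l m (by omega)
    rw [List.range_eq_range']
    obtain ⟨hperm, hsorted, _⟩ := hl ▸ H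
    refine ⟨hperm, ?_⟩
    rwa [List.take_of_length_le (by rw [hperm.length_eq]; omega)] at hsorted

lemma counts_getD (l : List Char) : ∀ (init : List Int), init.length = 128 →
    (∀ c ∈ l, c.toNat < 128) → ∀ k, k < 128 →
    (l.foldl (fun cs ch => cs.set ch.toNat (cs.getD ch.toNat 0 + 1)) init).getD k 0
      = init.getD k 0 + (l.countP (fun c => c.toNat == k) : Int) := by
  induction l with
  | nil => intro init _ _ k _; simp
  | cons c l ih =>
    intro init hlen hl k hk
    rw [List.foldl_cons]
    have hc : c.toNat < 128 := hl c (by simp)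
    have hlen' : (init.set c.toNat (init.getD c.toNat 0 + 1)).length = 128 := by
      rw [List.length_set]; exact hlen
    rw [ih _ hlen' (fun e he => hl e (by simp [he])) k hk]
    rw [getD_set_lt _ _ _ _ _ (by omega)]
    rw [List.countP_cons]
    by_cases hkc : k = c.toNat
    · rw [if_pos hkc]; subst hkc; simp; omega
    · rw [if_neg hkc]
      have : (c.toNat == k) = false := by simp; omega
      rw [this]; simp

lemma count_emit (m : Nat → Nat) : ∀ (ks : List Nat), (∀ k ∈ ks, k < 128) → ks.Nodup →
    ∀ (a : Char), (ks.flatMap (fun c => List.replicate (m c) (Char.ofNat c))).count a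
      = if a.toNat ∈ ks then m a.toNat else 0 := by
  intro ks
  induction ks with
  | nil => intro _ _ a; simp
  | cons k ks ih =>
    intro hks hnd a
    rw [List.flatMap_cons, List.count_append]
    have hk : k < 128 := hks k (by simp)
    have hrest := ih (fun e he => hks e (by simp [he])) (List.nodup_cons.mp hnd).2 a
    rw [hrest, List.count_replicate]
    by_cases hak : a.toNat = k
    · have ha : a = Char.ofNat k := char_toNat_inj _ _ (by rw [hak, charOfNat_toNat k hk])
      rw [if_pos (by simp [ha]), if_neg (by rw [hak]; exact (List.nodup_cons.mp hnd).1),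
        if_pos (by simp [hak])]
      rw [hak]; omega
    · have ha : ¬ ((Char.ofNat k == a) = true) := by
        simp only [beq_iff_eq]
        intro h; exact hak (by rw [← h, charOfNat_toNat k hk])
      rw [if_neg ha]
      have hmem : (a.toNat ∈ k :: ks) ↔ (a.toNat ∈ ks) := by simp [hak]
      by_cases h2 : a.toNat ∈ ks
      · rw [if_pos h2, if_pos (hmem.mpr h2)]; omega
      · rw [if_neg h2, if_neg (fun hx => h2 (hmem.mp hx))]

lemma emit_sorted (m : Nat → Nat) : ∀ (ks : List Nat), ks.Pairwise (· < ·) → (∀ k ∈ ks, k < 128) →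
    (ks.flatMap (fun c => List.replicate (m c) (Char.ofNat c))).Pairwise (· ≤ ·) := by
  intro ks
  induction ks with
  | nil => intro _ _; simp
  | cons k ks ih =>
    intro hpw hks
    rw [List.flatMap_cons, List.pairwise_append]
    refine ⟨List.pairwise_replicate.mpr (Or.inr (le_refl _)), ih (List.pairwise_cons.mp hpw).2
      (fun e he => hks e (by simp [he])), ?_⟩
    intro a ha b hb
    obtain ⟨c, hc, hbc⟩ := List.mem_flatMap.mp hb
    have ha' : a = Char.ofNat k := List.eq_of_mem_replicate ha
    have hb' : b = Char.ofNat c := List.eq_of_mem_replicate hbc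
    have hkc : k < c := (List.pairwise_cons.mp hpw).1 c hc
    rw [ha', hb', char_le_iff, charOfNat_toNat k (hks k (by simp)),
      charOfNat_toNat c (hks c (by simp [hc]))]
    omega

lemma sorted_unique (l1 l2 : List Char) (hp : l1.Perm l2)
    (h1 : l1.Pairwise (· ≤ ·)) (h2 : l2.Pairwise (· ≤ ·)) : l1 = l2 :=
  List.Perm.eq_of_pairwise (fun _ _ _ _ hab hba => le_antisymm hab hba) h1 h2 hp

lemma copy_loop (l : List Char) :
    (PySem.List.pyRange 0 (l.length : Int) 1).foldl
      (fun acc i => acc ++ [PySem.List.pyGetD l i ' ']) [] = l := by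
  rw [PySem.List.foldl_pyRange_zero_pyGetD' l ' ' (fun acc v => acc ++ [v]) []]
  exact PySem.List.foldl_append_singleton_eq_self l []

lemma nested_bridge (l : List Char) :
    (PySem.List.pyRange 0 (l.length : Int) 1).foldl (fun r i =>
      (PySem.List.pyRange 0 (l.length : Int) 1).foldl (fun r j =>
        if PySem.List.pyGetD r i ' ' < PySem.List.pyGetD r j ' ' then
          PySem.List.pySetD (PySem.List.pySetD r i (PySem.List.pyGetD r j ' ')) j
            (PySem.List.pyGetD r i ' ')
        else r) r) l = outerLoop l.length l := by
  rw [PySem.List.pyRange_zero_nat]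
  simp only [List.foldl_map, PySem.List.pyGetD_natCast, PySem.List.pySetD_natCast]
  rfl

-- ===== VERDICT (by name: the statement is the Claim_ definition above) =====
theorem AlphabetSoupNaive_spec : Claim_equal_AlphabetSoupNaive := by
  intro s hdom
  unfold Spec_AlphabetSoupNaive
  simp only [AlphabetSoupNaive, AlphabetSoupNaive_alt]
  set L := s.toList.filter (fun c => !pvPunct.contains c) with hL
  have hchar : ∀ c ∈ L, c.toNat < 128 := by
    intro c hc
    have hcs : c ∈ s.toList := by rw [hL] at hc; exact List.mem_of_mem_filter hc
    have := (List.all_eq_true.mp hdom) c hcs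
    simp [pvDomChar] at this
    omega
  -- A's side: the copy loop is the identity and the nested loop is outerLoop
  rw [copy_loop L, nested_bridge L]
  have hlenO : (outerLoop L.length L).length = L.length := (outer_sorts L).1.length_eq
  rw [show (L.length : Int) = ((outerLoop L.length L).length : Int) by rw [hlenO],
    copy_loop (outerLoop L.length L)]
  -- B's side: the counting fold counts occurrences of each code point
  set C := L.foldl (fun cs ch => cs.set ch.toNat (cs.getD ch.toNat 0 + 1))
      (List.replicate 128 (0 : Int)) with hCdef
  have hC : ∀ k, k < 128 → C.getD k 0 = (L.countP (fun c => c.toNat == k) : Int) := by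
    intro k hk
    rw [hCdef, counts_getD L (List.replicate 128 (0 : Int)) (by simp) hchar k hk,
      List.getD, List.getElem?_replicate, if_pos hk]
    simp
  set E := (List.range 128).flatMap (fun c => List.replicate ((C.getD c 0).toNat) (Char.ofNat c))
    with hEdef
  have hEperm : E.Perm L := by
    rw [List.perm_iff_count]
    intro a
    rw [hEdef, count_emit (fun c => (C.getD c 0).toNat) (List.range 128)
      (fun k hk => List.mem_range.mp hk) (List.nodup_range) a]
    by_cases h : a.toNat < 128
    · rw [if_pos (List.mem_range.mpr h), hC a.toNat h]
      have : L.countP (fun c => c.toNat == a.toNat) = L.count a := by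
        rw [List.count]
        apply List.countP_congr
        intro c _
        simp only [beq_iff_eq]
        constructor
        · intro hh; exact Char.ext (UInt32.toNat_inj.mp hh)
        · intro hh; rw [hh]
      rw [this]; simp
    · rw [if_neg (by simpa using h)]
      symm
      rw [List.count_eq_zero]
      intro hmem
      exact h (hchar a hmem)
  have hEsorted : E.Pairwise (· ≤ ·) := by
    rw [hEdef]
    exact emit_sorted (fun c => (C.getD c 0).toNat) (List.range 128)
      (List.pairwise_lt_range) (fun k hk => List.mem_range.mp hk)
  apply congrArg String.ofList
  exact sorted_unique _ _ ((outer_sorts L).1.trans hEperm.symm) (outer_sorts L).2 hEsorted
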